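-- pv_equiv track=rewrite | github.com/jessielw/AutoQPF | auto_qpf/generate_chapters.py | _get_menu_info_only
-- ===== SOURCE A (Python) =====
-- def _get_menu_info_only(media_info_menu: dict):
--     chapter_dict = {}
--     chapters_only = list(media_info_menu.keys()).index("chapters_pos_end") + 1
--     chapter_keys = list(media_info_menu.keys())[chapters_only:]
--     chapter_values = list(media_info_menu.values())[chapters_only:]
--
--     for val, key in zip(chapter_keys, chapter_values, strict=True):
--         chapter_dict.update({val: key})
--
--     return chapter_dict, chapter_keys, chapter_values
-- ===== SOURCE B (Python) =====
-- def _get_menu_info_only(media_info_menu: dict):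
--     it = iter(media_info_menu.items())
--     for key, _value in it:
--         if key == "chapters_pos_end":
--             pairs = list(it)
--             chapter_keys = [k for k, _ in pairs]
--             chapter_values = [v for _, v in pairs]
--             return dict(pairs), chapter_keys, chapter_values
--     raise ValueError("'chapters_pos_end' is not in list")
-- ===== Notes on version B (the rewrite author's own statement) =====
-- stated objective: simpler
-- what changed: Replaces index()-then-three-slices plus an update loop with a single pass: advance an iterator to the sentinel key, then the remaining items are the result directly.
import Mathlib
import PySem

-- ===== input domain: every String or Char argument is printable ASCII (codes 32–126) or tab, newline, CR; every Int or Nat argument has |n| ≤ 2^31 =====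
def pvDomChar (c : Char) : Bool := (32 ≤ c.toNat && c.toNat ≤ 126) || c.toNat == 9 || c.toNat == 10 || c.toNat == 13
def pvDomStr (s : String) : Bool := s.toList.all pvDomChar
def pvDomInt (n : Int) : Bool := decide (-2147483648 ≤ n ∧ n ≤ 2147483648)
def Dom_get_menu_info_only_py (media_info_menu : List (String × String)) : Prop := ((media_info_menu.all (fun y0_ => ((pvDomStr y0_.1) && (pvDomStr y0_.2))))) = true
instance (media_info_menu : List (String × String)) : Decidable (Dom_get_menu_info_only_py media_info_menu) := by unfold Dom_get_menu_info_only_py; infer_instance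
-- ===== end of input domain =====

-- B replaces index()+three slices+update loop by one pass that stops at the sentinel key
-- and takes the remaining items directly (objective: simpler).

-- ===== PORT A =====
def get_menu_info_only_py (media_info_menu : List (String × String)) : (List (String × String)) × List String × List String :=
  match PySem.List.index? (media_info_menu.map Prod.fst) "chapters_pos_end" with
  | none => ([], [], [])   -- list.index raises ValueError here; excluded by Pre_
  | some i =>
    let chapters_only : Int := (i : Int) + 1
    let chapter_keys := PySem.List.slice (media_info_menu.map Prod.fst) (some chapters_only) none
    let chapter_values := PySem.List.slice (media_info_menu.map Prod.snd) (some chapters_only) none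
    let chapter_dict := ((chapter_keys.zip chapter_values).foldl
        (fun d p => d.insert p.1 p.2) (PySem.Dict.empty : PySem.Dict String String)).items
    (chapter_dict, chapter_keys, chapter_values)

-- ===== PORT B =====
-- the for-loop over the iterator up to the sentinel: returns the remaining items, none = sentinel absent
def pvAltTail (items : List (String × String)) : Option (List (String × String)) :=
  match items with
  | [] => none
  | (k, _) :: rest => if k == "chapters_pos_end" then some rest else pvAltTail rest

def get_menu_info_only_py_alt (media_info_menu : List (String × String)) : (List (String × String)) × List String × List String :=
  match pvAltTail media_info_menu with
  | none => ([], [], [])   -- B raises ValueError here; excluded by Pre_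
  | some pairs =>
    ((PySem.Dict.ofList pairs).items, pairs.map Prod.fst, pairs.map Prod.snd)

-- ===== PRECONDITION & SPEC =====
-- Pre_ excludes exactly the inputs without the key "chapters_pos_end", on which both A and B raise ValueError.
def Pre_get_menu_info_only_py (media_info_menu : List (String × String)) : Prop :=
  "chapters_pos_end" ∈ media_info_menu.map Prod.fst
instance (media_info_menu : List (String × String)) : Decidable (Pre_get_menu_info_only_py media_info_menu) := by unfold Pre_get_menu_info_only_py; infer_instance
def pvWitness_get_menu_info_only_py : (List (String × String)) := [("chapters_pos_end", "x"), ("a", "1")]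
def Spec_get_menu_info_only_py (media_info_menu : List (String × String)) (out : (List (String × String)) × List String × List String) : Prop := out = get_menu_info_only_py_alt media_info_menu
instance (media_info_menu : List (String × String)) (out : (List (String × String)) × List String × List String) : Decidable (Spec_get_menu_info_only_py media_info_menu out) := by unfold Spec_get_menu_info_only_py; infer_instance

-- ===== CLAIM (what is proved, stated in full; the proofs are below) =====
def Claim_equal_get_menu_info_only_py : Prop := ∀ (media_info_menu : List (String × String)), Dom_get_menu_info_only_py media_info_menu → Pre_get_menu_info_only_py media_info_menu → Spec_get_menu_info_only_py media_info_menu (get_menu_info_only_py media_info_menu)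

-- ===== LEMMAS AND PROOFS =====
lemma pvAltTail_eq_drop (m : List (String × String)) (i : Nat)
    (h : PySem.List.index? (m.map Prod.fst) "chapters_pos_end" = some i) :
    pvAltTail m = some (m.drop (i + 1)) := by
  induction m generalizing i with
  | nil => simp [PySem.List.index?_eq_idxOf?] at h
  | cons p rest ih =>
    obtain ⟨k, v⟩ := p
    by_cases hk : k = "chapters_pos_end"
    · subst hk
      rw [List.map_cons] at h; dsimp only at h
      rw [PySem.List.index?_cons_self] at h
      obtain rfl : (0 : Nat) = i := Option.some.inj h
      simp [pvAltTail]
    · rw [List.map_cons] at h; dsimp only at h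
      rw [PySem.List.index?_cons_of_ne _ hk] at h
      obtain ⟨j, hj, rfl⟩ := Option.map_eq_some_iff.mp h
      simpa [pvAltTail, hk] using ih j hj

-- ===== VERDICT (by name: the statement is the Claim_ definition above) =====
theorem get_menu_info_only_py_spec : Claim_equal_get_menu_info_only_py := by
  intro m _ hpre
  unfold Spec_get_menu_info_only_py
  obtain ⟨i, hi⟩ := Option.isSome_iff_exists.mp
    ((PySem.List.index?_isSome_iff (m.map Prod.fst) "chapters_pos_end").mpr hpre)
  have hcast : ((i : Int) + 1) = ((i + 1 : Nat) : Int) := by push_cast; ring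
  have hkeys : PySem.List.slice (m.map Prod.fst) (some ((i : Int) + 1)) none
      = (m.drop (i + 1)).map Prod.fst := by
    rw [hcast, PySem.List.slice_from_natCast, List.map_drop]
  have hvals : PySem.List.slice (m.map Prod.snd) (some ((i : Int) + 1)) none
      = (m.drop (i + 1)).map Prod.snd := by
    rw [hcast, PySem.List.slice_from_natCast, List.map_drop]
  have hzip : ((m.drop (i + 1)).map Prod.fst).zip ((m.drop (i + 1)).map Prod.snd)
      = m.drop (i + 1) := Eq.symm (List.zip_of_prod rfl rfl)
  simp only [get_menu_info_only_py, get_menu_info_only_py_alt, hi,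
    pvAltTail_eq_drop m i hi, hkeys, hvals, hzip]
  rfl
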